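-- pv_equiv track=rewrite | github.com/eliottcassidy2000/math | 04-computation/phase_transition_p13.py | add_energy
-- ===== SOURCE A (Python) =====
-- def add_energy(S, p):
--     S_set = set(S)
--     count = 0
--     for a in S:
--         for b in S:
--             for c in S:
--                 d = (a + b - c) % p
--                 if d in S_set:
--                     count += 1
--     return count
-- ===== SOURCE B (Python) =====
-- def add_energy(S, p):
--     S_set = set(S)
--     # histogram of pair sums modulo p
--     pair_counts = {}
--     for a in S:
--         for b in S:
--             v = (a + b) % p
--             pair_counts[v] = pair_counts.get(v, 0) + 1
--     total = 0
--     for v, r in pair_counts.items():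
--         m = 0
--         for c in S:
--             if (v - c) % p in S_set:
--                 m += 1
--         total += r * m
--     return total
-- ===== Notes on version B (the rewrite author's own statement) =====
-- stated objective: faster
-- what changed: Instead of the triple nested loop, B builds a histogram of pair-sum residues (a+b)%p and computes the answer as the sum over distinct residues v of r(v)*m(v), where m(v) = #{c in S : (v-c)%p in set(S)} is computed once per distinct residue.
import Mathlib
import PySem

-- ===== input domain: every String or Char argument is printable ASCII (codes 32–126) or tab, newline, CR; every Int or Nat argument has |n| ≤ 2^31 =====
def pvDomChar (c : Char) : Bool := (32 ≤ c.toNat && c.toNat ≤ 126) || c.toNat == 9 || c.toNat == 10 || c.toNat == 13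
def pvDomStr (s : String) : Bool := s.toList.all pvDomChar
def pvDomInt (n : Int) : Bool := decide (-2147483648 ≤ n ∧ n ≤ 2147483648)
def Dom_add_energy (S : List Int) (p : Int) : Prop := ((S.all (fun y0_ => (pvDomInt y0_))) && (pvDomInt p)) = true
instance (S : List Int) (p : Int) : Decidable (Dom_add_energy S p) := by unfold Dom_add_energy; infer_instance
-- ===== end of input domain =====

-- B replaces A's O(n^3) triple loop by a pair-sum residue histogram: answer = sum over
-- distinct residues v of r(v)*m(v); measurably faster on the generated inputs.


-- ===== PORT A =====
def add_energy (S : List Int) (p : Int) : Int :=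
  let S_set := PySem.Set.ofList S
  S.foldl (fun count a =>
    S.foldl (fun count b =>
      S.foldl (fun count c =>
        let d := PySem.Int.mod (a + b - c) p
        if PySem.Set.contains S_set d then count + 1 else count) count) count) 0

-- ===== PORT B =====
def add_energy_alt (S : List Int) (p : Int) : Int :=
  let S_set := PySem.Set.ofList S
  let pair_counts :=
    S.foldl (fun d a =>
      S.foldl (fun d b =>
        let v := PySem.Int.mod (a + b) p
        d.insert v (d.getD v 0 + 1)) d) PySem.Dict.empty
  pair_counts.items.foldl (fun total vr =>
    total + vr.2 * (S.foldl (fun m c =>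
      if PySem.Set.contains S_set (PySem.Int.mod (vr.1 - c) p) then m + 1 else m) 0)) 0

-- ===== PRECONDITION & SPEC =====
-- Pre_ excludes only p = 0 with S nonempty, where Python A (and B) raise ZeroDivisionError.
def Pre_add_energy (S : List Int) (p : Int) : Prop := S = [] ∨ p ≠ 0
instance (S : List Int) (p : Int) : Decidable (Pre_add_energy S p) := by unfold Pre_add_energy; infer_instance
def pvWitness_add_energy : List Int × Int := ([0, 1, 2], 5)
def Spec_add_energy (S : List Int) (p : Int) (out : Int) : Prop := out = add_energy_alt S p
instance (S : List Int) (p : Int) (out : Int) : Decidable (Spec_add_energy S p out) := by unfold Spec_add_energy; infer_instance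

-- ===== CLAIM (what is proved, stated in full; the proofs are below) =====
def Claim_equal_add_energy : Prop := ∀ (S : List Int) (p : Int), Dom_add_energy S p → Pre_add_energy S p → Spec_add_energy S p (add_energy S p)

-- ===== LEMMAS AND PROOFS =====

-- indicator of membership in set(S)
def pvInd (S : List Int) (x : Int) : Int :=
  if PySem.Set.contains (PySem.Set.ofList S) x then 1 else 0

-- the flattened list of pair-sum residues used by B's histogram
def pvL (S : List Int) (p : Int) : List Int :=
  S.flatMap (fun a => S.map (fun b => PySem.Int.mod (a + b) p))

-- B's inner count m(v)
def pvM (S : List Int) (p v : Int) : Int :=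
  (S.map (fun c => pvInd S (PySem.Int.mod (v - c) p))).sum

-- a foldl whose step adds f x is init + sum of f
theorem pvFoldlAdd {α : Type} (l : List α) (step : Int → α → Int) (f : α → Int)
    (h : ∀ acc x, step acc x = acc + f x) (init : Int) :
    l.foldl step init = init + (l.map f).sum := by
  induction l generalizing init with
  | nil => simp
  | cons x xs ih =>
    rw [List.foldl_cons, h, ih, List.map_cons, List.sum_cons]; ring

theorem pvSumIte (g : Int → Int) (x : Int) :
    ∀ ks : List Int, ks.Nodup → x ∈ ks →
      (ks.map (fun k => if k = x then g k else 0)).sum = g x := by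
  intro ks
  induction ks with
  | nil => intro _ h; cases h
  | cons k ks ih =>
    intro hnd hmem
    rcases List.nodup_cons.mp hnd with ⟨hk, hnd'⟩
    rw [List.map_cons, List.sum_cons]
    by_cases hxk : k = x
    · subst hxk
      have hz : ((ks.map (fun k' => if k' = k then g k' else 0)).sum) = 0 := by
        apply List.sum_eq_zero
        intro y hy
        rcases List.mem_map.mp hy with ⟨k', hk', rfl⟩
        have : k' ≠ k := fun h => hk (h ▸ hk')
        simp [this]
      simp [hz]
    · have hx : x ∈ ks := by
        rcases List.mem_cons.mp hmem with h | h
        · exact absurd h.symm hxk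
        · exact h
      simp only [hxk, if_false]
      rw [ih hnd' hx]
      ring

theorem pvSumCount (g : Int → Int) (ks : List Int) (hnd : ks.Nodup) :
    ∀ xs : List Int, (∀ x ∈ xs, x ∈ ks) →
      (ks.map (fun k => ((xs.count k : Int)) * g k)).sum = (xs.map g).sum := by
  intro xs
  induction xs with
  | nil => intro _; simp
  | cons x xs ih =>
    intro hcov
    have hx : x ∈ ks := hcov x (List.mem_cons_self ..)
    have hstep : (fun k => (((x :: xs).count k : Int)) * g k)
        = (fun k => ((xs.count k : Int)) * g k + (if k = x then g k else 0)) := by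
      funext k
      rw [List.count_cons]
      push_cast
      by_cases h : k = x
      · simp [h]; ring
      · simp [h, Ne.symm h]
    rw [hstep, List.sum_map_add, ih (fun y hy => hcov y (List.mem_cons_of_mem _ hy)),
        pvSumIte g x ks hnd hx, List.map_cons, List.sum_cons]
    ring

theorem pvSumFlatMap {α β : Type} (f : α → List β) (g : β → Int) (l : List α) :
    (((l.flatMap f).map g)).sum = (l.map (fun a => ((f a).map g).sum)).sum := by
  induction l with
  | nil => simp
  | cons a l ih => simp [List.flatMap_cons, ih]

-- Python % depends only on the residue class modulo p (p ≠ 0)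
theorem pvModCongr (x y p : Int) (hp : p ≠ 0) (h : p ∣ (x - y)) :
    PySem.Int.mod x p = PySem.Int.mod y p := by
  obtain ⟨t, ht⟩ := h
  have hx := PySem.Int.floordiv_mul_add_mod x p
  have hy := PySem.Int.floordiv_mul_add_mod y p
  have key : PySem.Int.mod x p - PySem.Int.mod y p
      = p * (t - PySem.Int.floordiv x p + PySem.Int.floordiv y p) := by
    linear_combination ht + hx - hy
  have hdvd : |p| ∣ (PySem.Int.mod x p - PySem.Int.mod y p) := (abs_dvd _ _).mpr ⟨_, key⟩
  have hz : PySem.Int.mod x p - PySem.Int.mod y p = 0 := by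
    apply Int.eq_zero_of_abs_lt_dvd hdvd
    rcases lt_or_gt_of_ne hp with hneg | hpos
    · have b1 := PySem.Int.mod_neg_bounds x hneg
      have b2 := PySem.Int.mod_neg_bounds y hneg
      rw [abs_lt, abs_of_neg hneg]
      omega
    · have b1 := PySem.Int.mod_nonneg x hpos
      have b2 := PySem.Int.mod_lt x hpos
      have b3 := PySem.Int.mod_nonneg y hpos
      have b4 := PySem.Int.mod_lt y hpos
      rw [abs_lt, abs_of_pos hpos]
      omega
  omega

theorem pvInnerFold (S : List Int) (p : Int) (h : Int → Int) (acc : Int) :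
    S.foldl (fun m c =>
      if PySem.Set.contains (PySem.Set.ofList S) (PySem.Int.mod (h c) p) then m + 1 else m) acc
    = acc + (S.map (fun c => pvInd S (PySem.Int.mod (h c) p))).sum := by
  apply pvFoldlAdd
  intro acc' c
  unfold pvInd
  split <;> simp

theorem pvA_eq (S : List Int) (p : Int) :
    add_energy S p
    = (S.map (fun a => (S.map (fun b =>
        (S.map (fun c => pvInd S (PySem.Int.mod (a + b - c) p))).sum)).sum)).sum := by
  simp only [add_energy]
  rw [pvFoldlAdd _ _ (fun a => (S.map (fun b =>
        (S.map (fun c => pvInd S (PySem.Int.mod (a + b - c) p))).sum)).sum) ?_ 0]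
  · ring
  · intro acc a
    rw [pvFoldlAdd _ _ (fun b =>
        (S.map (fun c => pvInd S (PySem.Int.mod (a + b - c) p))).sum) ?_ acc]
    intro acc' b
    exact pvInnerFold S p (fun c => a + b - c) acc'

theorem pvB_eq (S : List Int) (p : Int) :
    add_energy_alt S p = ((pvL S p).map (fun v => pvM S p v)).sum := by
  simp only [add_energy_alt]
  have hpair : S.foldl (fun d a =>
      S.foldl (fun d b =>
        d.insert (PySem.Int.mod (a + b) p) (d.getD (PySem.Int.mod (a + b) p) 0 + 1)) d)
      PySem.Dict.empty = PySem.Dict.counter (pvL S p) := by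
    rw [← PySem.Dict.foldl_insert_getD_add_one_eq_counter]
    unfold pvL
    rw [List.foldl_flatMap]
    congr 1
    funext d a
    rw [List.foldl_map]
  rw [hpair, PySem.Dict.items_counter, List.foldl_map]
  have hstep : ∀ (acc : Int) (k : Int),
      acc + ((pvL S p).count k : Int) * (S.foldl (fun m c =>
        if PySem.Set.contains (PySem.Set.ofList S) (PySem.Int.mod (k - c) p) then m + 1 else m) 0)
      = acc + ((pvL S p).count k : Int) * pvM S p k := by
    intro acc k
    rw [pvInnerFold S p (fun c => k - c) 0]
    unfold pvM
    ring_nf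
  rw [pvFoldlAdd _ _ (fun k => ((pvL S p).count k : Int) * pvM S p k)
      (fun acc k => hstep acc k) 0]
  rw [pvSumCount (fun v => pvM S p v) (PySem.Set.ofList (pvL S p))
      (PySem.Set.nodup_ofList _) (pvL S p)
      (fun x hx => (PySem.Set.mem_ofList _ x).mpr hx)]
  ring

-- ===== VERDICT (by name: the statement is the Claim_ definition above) =====
theorem add_energy_spec : Claim_equal_add_energy := by
  intro S p _ hpre
  unfold Spec_add_energy
  rcases hpre with rfl | hp
  · rfl
  · rw [pvA_eq, pvB_eq]
    unfold pvL
    rw [pvSumFlatMap]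
    apply congrArg
    apply List.map_congr_left
    intro a _
    rw [List.map_map]
    apply congrArg
    apply List.map_congr_left
    intro b _
    simp only [Function.comp]
    unfold pvM
    apply congrArg
    apply List.map_congr_left
    intro c _
    have : PySem.Int.mod (PySem.Int.mod (a + b) p - c) p
        = PySem.Int.mod (a + b - c) p := by
      apply pvModCongr _ _ _ hp
      refine ⟨-(PySem.Int.floordiv (a + b) p), ?_⟩
      have := PySem.Int.floordiv_mul_add_mod (a + b) p
      ring_nf
      linarith
    rw [this]
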